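-- pv_equiv track=rewrite | github.com/JODONG2/ALGORITHM | BOJ/line/line_1.py | solution
-- ===== SOURCE A (Python) =====
-- from typing import List
--
-- def solution(queries: List[List[int]]) -> int:
--     answer = 0
--     arr = [[1,0] for _ in range(1000)]
--     for idx, cnt in queries :
--         if arr[idx][1] == 0 :
--             arr[idx][1] += cnt
--             while arr[idx][0] < arr[idx][1] : arr[idx][0] *= 2
--         else :
--             if arr[idx][0]< arr[idx][1] + cnt:
--                 answer += arr[idx][1]
--             arr[idx][1] += cnt
--             while arr[idx][0] < arr[idx][1] : arr[idx][0] *= 2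
--     return answer
-- ===== SOURCE B (Python) =====
-- from typing import List
--
-- def solution(queries: List[List[int]]) -> int:
--     # Stage 1: group each slot's counts together (slot = idx % 1000, Python's
--     # negative-index wraparound); Stage 2: replay each slot independently with a
--     # prefix sum p and running max m, deriving the capacity from m in closed form.
--     buckets = {}
--     for idx, cnt in queries:
--         buckets.setdefault(idx % 1000, []).append(cnt)
--     answer = 0
--     for cnts in buckets.values():
--         p = 0  # current count in this slot
--         m = 1  # max(1, all prefix counts so far) -> capacity = 1 << (m-1).bit_length()
--         for cnt in cnts:
--             if p != 0 and (1 << (m - 1).bit_length()) < p + cnt: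
--                 answer += p
--             p += cnt
--             if p > m:
--                 m = p
--     return answer
-- ===== Notes on version B (the rewrite author's own statement) =====
-- stated objective: alternative
-- what changed: A's single interleaved pass over a 1000-slot mutable state array (per-slot [capacity,count] with a doubling while-loop) is replaced by two staged passes: first group each slot's counts into a dict keyed by idx % 1000, then replay each slot's history independently with a prefix sum and a running max, deriving the capacity from the running max by a bit_length closed form.
import Mathlib
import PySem

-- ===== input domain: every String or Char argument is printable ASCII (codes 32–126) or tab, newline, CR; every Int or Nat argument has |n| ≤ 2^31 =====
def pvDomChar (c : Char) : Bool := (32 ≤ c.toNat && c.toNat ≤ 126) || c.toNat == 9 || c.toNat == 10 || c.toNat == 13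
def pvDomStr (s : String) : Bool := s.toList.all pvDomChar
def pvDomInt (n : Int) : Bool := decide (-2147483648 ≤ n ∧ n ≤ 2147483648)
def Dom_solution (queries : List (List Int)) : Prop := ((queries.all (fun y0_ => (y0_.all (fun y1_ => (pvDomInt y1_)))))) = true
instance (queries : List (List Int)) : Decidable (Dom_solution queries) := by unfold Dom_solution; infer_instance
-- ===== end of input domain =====

set_option maxRecDepth 8192


-- B replaces A's single interleaved pass over a 1000-slot state array by two staged passes:
-- bucket the counts per slot (idx % 1000) into a dict, then replay each bucket independently
-- with a prefix sum and running max, the capacity derived from the max in closed form;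
-- objective: alternative (same cost).

-- ===== PORT A =====
-- 'while arr[idx][0] < arr[idx][1]: arr[idx][0] *= 2'; the '0 < cap' conjunct is a totality
-- guard only (Python diverges there; unreachable: capacities are always positive powers of two)
def whileDouble (cap count : Int) : Int :=
  if h : 0 < cap ∧ cap < count then whileDouble (cap * 2) count else cap
termination_by (count - cap).toNat
decreasing_by omega

def stepA (st : Int × List (Int × Int)) (q : List Int) : Int × List (Int × Int) :=
  match q with
  | [idx, cnt] =>
    let cc := PySem.List.pyGetD st.2 idx (1, 0)
    if cc.2 = 0 then
      let count := cc.2 + cnt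
      (st.1, PySem.List.pySetD st.2 idx (whileDouble cc.1 count, count))
    else
      let ans := if cc.1 < cc.2 + cnt then st.1 + cc.2 else st.1
      let count := cc.2 + cnt
      (ans, PySem.List.pySetD st.2 idx (whileDouble cc.1 count, count))
  | _ => st  -- ValueError on unpacking; excluded by Pre_solution

def solution (queries : List (List Int)) : Int :=
  (queries.foldl stepA (0, List.replicate 1000 ((1 : Int), (0 : Int)))).1

-- ===== PORT B =====
-- pass 1: 'buckets.setdefault(idx % 1000, []).append(cnt)'
def step1 (d : PySem.Dict Int (List Int)) (q : List Int) : PySem.Dict Int (List Int) :=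
  match q with
  | [idx, cnt] => d.modify (PySem.Int.mod idx 1000) [] (fun l => l ++ [cnt])
  | _ => d  -- ValueError on unpacking; excluded by Pre_solution

def bucketsOf (queries : List (List Int)) : PySem.Dict Int (List Int) :=
  queries.foldl step1 PySem.Dict.empty

-- pass 2 inner loop body; state (answer, p, m); '1 << (m-1).bit_length()' is 1 <<< bitLength
def stepInner (st : Int × Int × Int) (cnt : Int) : Int × Int × Int :=
  let ans := st.1
  let p := st.2.1
  let m := st.2.2
  let ans := if p ≠ 0 ∧ (1 : Int) <<< PySem.Int.bitLength (m - 1) < p + cnt then ans + p else ans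
  let p := p + cnt
  let m := if p > m then p else m
  (ans, p, m)

def solution_alt (queries : List (List Int)) : Int :=
  (bucketsOf queries).values.foldl (fun ans cnts => (cnts.foldl stepInner (ans, 0, 1)).1) 0

-- ===== PRECONDITION & SPEC =====
-- Pre_ excludes exactly the inputs where A raises: a query that is not a 2-element list
-- (ValueError on unpacking) or whose index is outside [-1000, 1000) (IndexError).
def Pre_solution (queries : List (List Int)) : Prop :=
  ∀ q ∈ queries, q.length = 2 ∧ -1000 ≤ q.getD 0 0 ∧ q.getD 0 0 < 1000
instance (queries : List (List Int)) : Decidable (Pre_solution queries) := by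
  unfold Pre_solution; infer_instance

def pvWitness_solution : List (List Int) := [[3, 2], [3, 5], [-1, 4], [3, 1]]

def Spec_solution (queries : List (List Int)) (out : Int) : Prop := out = solution_alt queries
instance (queries : List (List Int)) (out : Int) : Decidable (Spec_solution queries out) := by
  unfold Spec_solution; infer_instance

-- ===== CLAIM (what is proved, stated in full; the proofs are below) =====
def Claim_equal_solution : Prop := ∀ (queries : List (List Int)), Dom_solution queries → Pre_solution queries → Spec_solution queries (solution queries)

-- ===== LEMMAS AND PROOFS =====

-- the counts destined for slot k, in query order (the common per-slot history both sides replay)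
def projQ (k : Int) (q : List Int) : List Int :=
  match q with
  | [idx, cnt] => if PySem.Int.mod idx 1000 = k then [cnt] else []
  | _ => []

def proj (k : Int) : List (List Int) → List Int
  | [] => []
  | q :: qs => projQ k q ++ proj k qs

-- replay of A's per-slot logic from state (cap, count)
def gSlot (s : Int × Int) : List Int → Int
  | [] => 0
  | cnt :: rest =>
    (if s.2 ≠ 0 ∧ s.1 < s.2 + cnt then s.2 else 0) +
      gSlot (whileDouble s.1 (s.2 + cnt), s.2 + cnt) rest

-- replay of B's per-slot logic from state (p, m)
def hSlot (p m : Int) : List Int → Int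
  | [] => 0
  | cnt :: rest =>
    (if p ≠ 0 ∧ (1 : Int) <<< PySem.Int.bitLength (m - 1) < p + cnt then p else 0) +
      hSlot (p + cnt) (if p + cnt > m then p + cnt else m) rest

-- minimality facts about bitLength
theorem bl_le {n : Int} {k : Nat} (h : n.natAbs < 2 ^ k) : PySem.Int.bitLength n ≤ k := by
  by_contra hlt
  push Not at hlt
  rcases eq_or_ne n 0 with rfl | hn
  · simp [PySem.Int.bitLength_zero] at hlt
  · have h1 := PySem.Int.two_pow_bitLength_le n hn
    have h2 : 2 ^ k ≤ 2 ^ (PySem.Int.bitLength n - 1) := Nat.pow_le_pow_right (by norm_num) (by omega)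
    omega

theorem lt_bl {n : Int} {k : Nat} (h : 2 ^ k ≤ n.natAbs) : k < PySem.Int.bitLength n := by
  have h1 := PySem.Int.lt_two_pow_bitLength n
  have : (2:Nat) ^ k < 2 ^ PySem.Int.bitLength n := by omega
  exact (Nat.pow_lt_pow_iff_right (by norm_num)).mp this

theorem bl_mono {a b : Int} (ha : 0 ≤ a) (hab : a ≤ b) :
    PySem.Int.bitLength a ≤ PySem.Int.bitLength b := by
  apply bl_le
  have h1 := PySem.Int.lt_two_pow_bitLength b
  omega

theorem natAbs_pred_ge {c : Int} {e : Nat} (h : (2:Int) ^ e < c) : 2 ^ e ≤ (c - 1).natAbs := by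
  have hp : (0:Int) < 2 ^ e := by positivity
  have h2 : (((c - 1).natAbs : Nat) : Int) = c - 1 := Int.natAbs_of_nonneg (by omega)
  have h3 : ((2:Nat) ^ e : Int) ≤ (((c - 1).natAbs : Nat) : Int) := by rw [h2]; push_cast; omega
  exact_mod_cast h3

theorem natAbs_pred_lt {c : Int} {e : Nat} (h0 : 1 < c) (h : c ≤ (2:Int) ^ e) : (c - 1).natAbs < 2 ^ e := by
  have h2 : (((c - 1).natAbs : Nat) : Int) = c - 1 := Int.natAbs_of_nonneg (by omega)
  have h3 : (((c - 1).natAbs : Nat) : Int) < ((2:Nat) ^ e : Int) := by rw [h2]; push_cast; omega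
  exact_mod_cast h3

theorem whileDouble_aux : ∀ (k e : Nat) (c : Int),
    PySem.Int.bitLength (c - 1) ≤ e + k → (2:Int) ^ e < c →
    whileDouble ((2:Int) ^ e) c = 2 ^ PySem.Int.bitLength (c - 1) := by
  intro k
  induction k with
  | zero =>
    intro e c hbl hlt
    exact absurd (lt_bl (natAbs_pred_ge hlt)) (by omega)
  | succ k ih =>
    intro e c hbl hlt
    have hp : (0:Int) < 2 ^ e := by positivity
    rw [whileDouble, dif_pos ⟨hp, hlt⟩]
    have hpow : (2:Int) ^ e * 2 = 2 ^ (e + 1) := by ring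
    rw [hpow]
    by_cases h2 : (2:Int) ^ (e+1) < c
    · exact ih (e+1) c (by omega) h2
    · rw [whileDouble, dif_neg (by push Not; intro _; omega)]
      have h1c : (1:Int) < c := by omega
      have hle : PySem.Int.bitLength (c-1) ≤ e + 1 := bl_le (natAbs_pred_lt h1c (by omega))
      have hgt : e < PySem.Int.bitLength (c-1) := lt_bl (natAbs_pred_ge hlt)
      have : PySem.Int.bitLength (c-1) = e + 1 := by omega
      rw [this]

-- the doubling while-loop equals the bit_length closed form, on power-of-two capacities
theorem while_eq_pow (e : Nat) (c : Int) :
    whileDouble ((2:Int) ^ e) c =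
      2 ^ (if 1 < c ∧ e < PySem.Int.bitLength (c - 1)
           then PySem.Int.bitLength (c - 1) else e) := by
  by_cases hlt : (2:Int) ^ e < c
  · have h1c : (1:Int) < c := by have : (0:Int) < 2 ^ e := by positivity
                                 omega
    have hgt : e < PySem.Int.bitLength (c-1) := lt_bl (natAbs_pred_ge hlt)
    rw [if_pos ⟨h1c, hgt⟩]
    exact whileDouble_aux (PySem.Int.bitLength (c-1)) e c (by omega) hlt
  · rw [whileDouble, dif_neg (by push Not; intro _; omega)]
    by_cases h1c : (1:Int) < c
    · have hle : PySem.Int.bitLength (c-1) ≤ e := bl_le (natAbs_pred_lt h1c (by omega))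
      rw [if_neg (by push Not; intro _; omega)]
    · rw [if_neg (by tauto)]

-- the updated exponent is the bitLength of the updated running max
theorem exp_max (m c : Int) (hm : 1 ≤ m) :
    (if 1 < c ∧ PySem.Int.bitLength (m - 1) < PySem.Int.bitLength (c - 1)
     then PySem.Int.bitLength (c - 1) else PySem.Int.bitLength (m - 1)) =
      PySem.Int.bitLength ((if c > m then c else m) - 1) := by
  by_cases hcm : c > m
  · rw [if_pos hcm]
    have h1c : 1 < c := by omega
    have hle : PySem.Int.bitLength (m - 1) ≤ PySem.Int.bitLength (c - 1) :=
      bl_mono (by omega) (by omega)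
    by_cases hlt : PySem.Int.bitLength (m - 1) < PySem.Int.bitLength (c - 1)
    · rw [if_pos ⟨h1c, hlt⟩]
    · rw [if_neg (fun hh => hlt hh.2)]
      omega
  · rw [if_neg hcm]
    by_cases h1c : 1 < c
    · have hle : PySem.Int.bitLength (c - 1) ≤ PySem.Int.bitLength (m - 1) :=
        bl_mono (by omega) (by omega)
      rw [if_neg (by rintro ⟨h1, h2⟩; omega)]
    · rw [if_neg (fun hh => h1c hh.1)]

-- A's per-slot replay from a fresh slot equals B's: the capacity IS 2 ^ bitLength(m - 1)
theorem gSlot_eq_hSlot : ∀ (cnts : List Int) (p m : Int), 1 ≤ m →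
    gSlot ((2:Int) ^ PySem.Int.bitLength (m - 1), p) cnts = hSlot p m cnts := by
  intro cnts
  induction cnts with
  | nil => intro p m _; rfl
  | cons cnt rest ih =>
    intro p m hm
    have hshift : (1 : Int) <<< PySem.Int.bitLength (m - 1) = 2 ^ PySem.Int.bitLength (m - 1) := by
      simp [Int.shiftLeft_eq]
    rw [gSlot, hSlot, hshift, while_eq_pow, exp_max (m := m) (c := p + cnt) hm,
        ih (p + cnt) (if p + cnt > m then p + cnt else m) (by split_ifs <;> omega)]

-- normalized Nat index for python indexing under InRange
def pvIdx (n : Nat) (i : Int) : Nat := if 0 ≤ i then i.toNat else n - (-i).toNat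

theorem pvIdx_lt {n : Nat} {i : Int} (_h1 : -(n:Int) ≤ i) (h2 : i < n) (hn : 0 < n) : pvIdx n i < n := by
  unfold pvIdx; split_ifs <;> omega

theorem pyGetD_norm {α : Type} (xs : List α) (i : Int) (d : α)
    (h1 : -(xs.length:Int) ≤ i) (h2 : i < xs.length) :
    PySem.List.pyGetD xs i d = xs.getD (pvIdx xs.length i) d := by
  unfold pvIdx
  split_ifs with h0
  · rw [PySem.List.pyGetD_eq_getElem xs d h0 h2, List.getD_eq_getElem xs d (by omega)]
  · obtain ⟨k, rfl⟩ : ∃ k : Nat, i = -(k:Int) := ⟨(-i).toNat, by omega⟩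
    rw [PySem.List.pyGetD_neg_natCast xs k d (by omega) (by omega),
        List.getD_eq_getElem xs d (by simp; omega)]
    congr 1
    simp

theorem pySetD_norm {α : Type} (xs : List α) (i : Int) (v : α)
    (h1 : -(xs.length:Int) ≤ i) (h2 : i < xs.length) :
    PySem.List.pySetD xs i v = xs.set (pvIdx xs.length i) v := by
  simp only [PySem.List.pySetD, PySem.List.pySet?, PySem.List.pyIdx?, pvIdx]
  by_cases h0 : 0 ≤ i
  · rw [if_pos h0, if_pos (by omega), if_pos h0]; simp
  · rw [if_neg h0, if_pos (by omega), if_neg h0]; simp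

-- python wraparound slot = idx % 1000
theorem mod_eq_pvIdx {idx : Int} (h1 : -1000 ≤ idx) (h2 : idx < 1000) :
    PySem.Int.mod idx 1000 = ((pvIdx 1000 idx : Nat) : Int) := by
  rw [PySem.Int.mod_eq_emod_of_pos (by norm_num)]
  unfold pvIdx
  split_ifs <;> omega

theorem getD_set_self {α : Type} (xs : List α) (j : Nat) (v d : α) (h : j < xs.length) :
    (xs.set j v).getD j d = v := by
  rw [List.getD_eq_getElem _ d (by simpa using h)]
  simp

theorem getD_set_ne {α : Type} (xs : List α) (i j : Nat) (v d : α) (h : i ≠ j) :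
    (xs.set i v).getD j d = xs.getD j d := by
  by_cases hj : j < xs.length
  · rw [List.getD_eq_getElem _ d (by simpa using hj), List.getD_eq_getElem _ d hj]
    simp [h]
  · rw [List.getD_eq_default _ d (by simpa using hj), List.getD_eq_default _ d (by omega)]

theorem getD_replicate' {α : Type} (n j : Nat) (a d : α) (h : j < n) :
    (List.replicate n a).getD j d = a := by
  rw [List.getD_eq_getElem _ _ (by rw [List.length_replicate]; exact h)]
  exact List.getElem_replicate ..

-- a range-sum changes only at the touched slot
theorem sum_update : ∀ (n : Nat) (j0 : Nat) (f f' : Nat → Int), j0 < n →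
    (∀ j, j < n → j ≠ j0 → f j = f' j) →
    ((List.range n).map f).sum = f j0 - f' j0 + ((List.range n).map f').sum := by
  intro n
  induction n with
  | zero => intro j0 f f' hj _; exact absurd hj (by omega)
  | succ n ih =>
    intro j0 f f' hj h
    rw [List.range_succ, List.map_append, List.map_append, List.sum_append, List.sum_append]
    simp only [List.map_cons, List.map_nil, List.sum_cons, List.sum_nil, add_zero]
    by_cases hj0 : j0 = n
    · subst hj0
      have hpre : (List.range j0).map f = (List.range j0).map f' := by
        apply List.map_congr_left
        intro j hjm
        have := List.mem_range.mp hjm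
        exact h j (by omega) (by omega)
      rw [hpre]
      ring
    · have hfn : f n = f' n := h n (by omega) (fun e => hj0 e.symm)
      rw [ih j0 f f' (by omega) (fun j hjn hne => h j (by omega) hne), hfn]
      ring

-- A's interleaved pass decomposes into independent per-slot replays
theorem A_decomp : ∀ (qs : List (List Int)) (ans : Int) (arr : List (Int × Int)),
    (∀ q ∈ qs, q.length = 2 ∧ -1000 ≤ q.getD 0 0 ∧ q.getD 0 0 < 1000) →
    arr.length = 1000 →
    (qs.foldl stepA (ans, arr)).1 =
      ans + ((List.range 1000).map
        (fun j => gSlot (arr.getD j ((1:Int), (0:Int))) (proj (j : Int) qs))).sum := by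
  intro qs
  induction qs with
  | nil =>
    intro ans arr _ _
    have h0 : ∀ j ∈ List.range 1000,
        gSlot (arr.getD j ((1:Int), (0:Int))) (proj (j : Int) []) = (fun _ : Nat => (0:Int)) j :=
      fun j _ => rfl
    rw [List.foldl_nil, List.map_congr_left h0, List.map_const']
    simp
  | cons q qs ih =>
    intro ans arr hq harr
    obtain ⟨hlen, hge, hlt⟩ := hq q (by simp)
    obtain ⟨idx, cnt, rfl⟩ : ∃ a b, q = [a, b] := by
      cases q with
      | nil => simp at hlen
      | cons a t =>
        cases t with
        | nil => simp at hlen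
        | cons b t2 =>
          cases t2 with
          | nil => exact ⟨a, b, rfl⟩
          | cons c t3 => simp at hlen
    have hge' : (-1000:Int) ≤ idx := by simpa using hge
    have hlt' : idx < 1000 := by simpa using hlt
    have hj : pvIdx 1000 idx < 1000 := pvIdx_lt (by push_cast; omega) (by push_cast; omega) (by omega)
    set j0 := pvIdx 1000 idx with hjdef
    set cc := arr.getD j0 ((1:Int), (0:Int)) with hccdef
    have hgA : PySem.List.pyGetD arr idx ((1:Int),(0:Int)) = cc := by
      rw [pyGetD_norm arr idx _ (by rw [harr]; push_cast; omega) (by rw [harr]; push_cast; omega)]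
      rw [harr]
    have hsetA : ∀ v, PySem.List.pySetD arr idx v = arr.set j0 v := by
      intro v
      rw [pySetD_norm arr idx v (by rw [harr]; push_cast; omega) (by rw [harr]; push_cast; omega)]
      rw [harr]
    have hA : stepA (ans, arr) [idx, cnt] =
        (ans + (if cc.2 ≠ 0 ∧ cc.1 < cc.2 + cnt then cc.2 else 0),
         arr.set j0 (whileDouble cc.1 (cc.2 + cnt), cc.2 + cnt)) := by
      by_cases hc : cc.2 = 0
      · simp [stepA, hgA, hsetA, hc]
      · by_cases h2 : cc.1 < cc.2 + cnt <;> simp [stepA, hgA, hsetA, hc, h2]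
    have hkey : ∀ j : Nat, (PySem.Int.mod idx 1000 = (j : Int)) ↔ j = j0 := by
      intro j
      rw [mod_eq_pvIdx hge' hlt']
      constructor
      · intro h; omega
      · intro h; omega
    have hproj : ∀ j : Nat, proj (j : Int) ([idx, cnt] :: qs) =
        (if j = j0 then [cnt] else []) ++ proj (j : Int) qs := by
      intro j
      rw [proj]
      show (if PySem.Int.mod idx 1000 = (j : Int) then [cnt] else []) ++ _ = _
      by_cases h : j = j0
      · rw [if_pos ((hkey j).mpr h), if_pos h]
      · rw [if_neg (fun hc => h ((hkey j).mp hc)), if_neg h]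
    rw [List.foldl_cons, hA,
        ih _ _ (fun q hq' => hq q (by simp [hq'])) (by simp [harr])]
    set v := (whileDouble cc.1 (cc.2 + cnt), cc.2 + cnt) with hvdef
    set δ := (if cc.2 ≠ 0 ∧ cc.1 < cc.2 + cnt then cc.2 else 0) with hddef
    have hsum := sum_update 1000 j0
      (fun j => gSlot (arr.getD j ((1:Int), (0:Int))) (proj (j : Int) ([idx, cnt] :: qs)))
      (fun j => gSlot ((arr.set j0 v).getD j ((1:Int), (0:Int))) (proj (j : Int) qs))
      hj
      (by
        intro j hjn hne
        simp only
        rw [hproj j, if_neg hne, List.nil_append, getD_set_ne arr j0 j v _ (fun h => hne h.symm)])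
    have hat : gSlot (arr.getD j0 ((1:Int), (0:Int))) (proj (j0 : Int) ([idx, cnt] :: qs)) =
        δ + gSlot ((arr.set j0 v).getD j0 ((1:Int), (0:Int))) (proj (j0 : Int) qs) := by
      rw [hproj j0, if_pos rfl, List.singleton_append, ← hccdef, getD_set_self arr j0 v _ (by omega)]
      rw [gSlot]
    rw [hsum]
    beta_reduce
    rw [hat]
    ring

-- pass 1 collects exactly the per-slot projection
theorem buckets_getD : ∀ (qs : List (List Int)) (d : PySem.Dict Int (List Int)) (k : Int),
    (qs.foldl step1 d).getD k [] = d.getD k [] ++ proj k qs := by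
  intro qs
  induction qs with
  | nil => intro d k; simp [proj]
  | cons q qs ih =>
    intro d k
    rw [List.foldl_cons, proj]
    rcases q with _ | ⟨a, _ | ⟨b, _ | ⟨c, t⟩⟩⟩
    · rw [ih]
      simp [step1, projQ]
    · rw [ih]
      simp [step1, projQ]
    · show (List.foldl step1 (d.modify (PySem.Int.mod a 1000) [] (fun l => l ++ [b])) qs).getD k []
        = d.getD k [] ++ ((if PySem.Int.mod a 1000 = k then [b] else []) ++ proj k qs)
      rw [ih, PySem.Dict.getD_modify]
      by_cases h : k = PySem.Int.mod a 1000
      · rw [if_pos h, if_pos h.symm, h]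
        simp
      · rw [if_neg h, if_neg (fun hc => h hc.symm)]
        simp
    · rw [ih]
      simp [step1, projQ]

-- pass 1 keys: distinct and in [0, 1000)
theorem buckets_keys_inv : ∀ (qs : List (List Int)) (d : PySem.Dict Int (List Int)),
    d.keys.Nodup → (∀ k ∈ d.keys, 0 ≤ k ∧ k < 1000) →
    (qs.foldl step1 d).keys.Nodup ∧ ∀ k ∈ (qs.foldl step1 d).keys, 0 ≤ k ∧ k < 1000 := by
  intro qs
  induction qs with
  | nil => intro d h1 h2; exact ⟨h1, h2⟩
  | cons q qs ih =>
    intro d h1 h2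
    rw [List.foldl_cons]
    rcases q with _ | ⟨idx, _ | ⟨cnt, _ | ⟨c, t⟩⟩⟩
    · exact ih d h1 h2
    · exact ih d h1 h2
    · show ((List.foldl step1 (d.modify (PySem.Int.mod idx 1000) [] (fun l => l ++ [cnt])) qs).keys.Nodup ∧ _)
      set k0 := PySem.Int.mod idx 1000 with hk0
      have hk0b : 0 ≤ k0 ∧ k0 < 1000 :=
        ⟨PySem.Int.mod_nonneg idx (by norm_num), PySem.Int.mod_lt idx (by norm_num)⟩
      by_cases hc : d.contains k0 = true
      · have hkeys := PySem.Dict.keys_modify d k0 [] (fun l => l ++ [cnt])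
        rw [PySem.Dict.keys_insert_of_contains d _ hc] at hkeys
        exact ih _ (by rw [hkeys]; exact h1) (by rw [hkeys]; exact h2)
      · have hkeys := PySem.Dict.keys_modify d k0 [] (fun l => l ++ [cnt])
        rw [PySem.Dict.keys_insert_of_not_contains d _ (by simpa using hc)] at hkeys
        apply ih
        · rw [hkeys]
          refine List.Nodup.append h1 (List.nodup_singleton _) ?_
          intro a ha hb
          rw [List.mem_singleton] at hb
          subst hb
          exact hc ((PySem.Dict.contains_iff_mem_keys d k0).mpr ha)
        · rw [hkeys]
          intro k hk
          rcases List.mem_append.mp hk with h | h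
          · exact h2 k h
          · rw [List.mem_singleton] at h; subst h; exact hk0b
    · exact ih d h1 h2

-- B's inner fold computes ans + hSlot
theorem inner_eq : ∀ (cnts : List Int) (ans p m : Int),
    (cnts.foldl stepInner (ans, p, m)).1 = ans + hSlot p m cnts := by
  intro cnts
  induction cnts with
  | nil => intro ans p m; simp [hSlot]
  | cons cnt rest ih =>
    intro ans p m
    rw [List.foldl_cons, hSlot]
    show (rest.foldl stepInner (stepInner (ans, p, m) cnt)).1 = _
    rw [stepInner]
    simp only
    rw [ih]
    by_cases h : p ≠ 0 ∧ (1 : Int) <<< PySem.Int.bitLength (m - 1) < p + cnt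
    · rw [if_pos h, if_pos h]; ring
    · rw [if_neg h, if_neg h]; ring

-- B's outer fold sums hSlot over the buckets
theorem outer_eq : ∀ (vals : List (List Int)) (ans : Int),
    (vals.foldl (fun ans cnts => (cnts.foldl stepInner (ans, 0, 1)).1) ans) =
      ans + (vals.map (hSlot 0 1)).sum := by
  intro vals
  induction vals with
  | nil => intro ans; simp
  | cons v vs ih =>
    intro ans
    rw [List.foldl_cons, ih, inner_eq]
    simp [add_assoc]

-- a sum over distinct values restricts to a distinct sublist when f vanishes elsewhere
theorem sum_restrict (f : Int → Int) : ∀ (L S : List Int), L.Nodup → S.Nodup →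
    (∀ k ∈ S, k ∈ L) → (∀ k ∈ L, k ∉ S → f k = 0) →
    (L.map f).sum = (S.map f).sum := by
  intro L
  induction L with
  | nil =>
    intro S _ _ hsub _
    have : S = [] := List.eq_nil_iff_forall_not_mem.mpr (fun a ha => by simpa using hsub a ha)
    simp [this]
  | cons a L ih =>
    intro S hL hS hsub hz
    have haL : a ∉ L := (List.nodup_cons.mp hL).1
    have hLnd : L.Nodup := (List.nodup_cons.mp hL).2
    by_cases haS : a ∈ S
    · have hperm : S.Perm (a :: S.erase a) := List.perm_cons_erase haS
      have hsum : (S.map f).sum = f a + ((S.erase a).map f).sum := by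
        rw [(hperm.map f).sum_eq]; simp
      rw [hsum, List.map_cons, List.sum_cons]
      congr 1
      apply ih _ hLnd (hS.erase a)
      · intro k hk
        have hk' := (List.Nodup.mem_erase_iff hS).mp hk
        rcases List.mem_cons.mp (hsub k hk'.2) with h | h
        · exact absurd h hk'.1
        · exact h
      · intro k hk hkS
        apply hz k (List.mem_cons_of_mem a hk)
        intro hkS'
        exact hkS ((List.Nodup.mem_erase_iff hS).mpr ⟨fun h => haL (h ▸ hk), hkS'⟩)
    · have hfa : f a = 0 := hz a (by simp) haS
      rw [List.map_cons, List.sum_cons, hfa, zero_add]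
      apply ih S hLnd hS
      · intro k hk
        rcases List.mem_cons.mp (hsub k hk) with h | h
        · exact absurd (h ▸ hk) haS
        · exact h
      · intro k hk
        exact hz k (List.mem_cons_of_mem a hk)

-- ===== VERDICT (by name: the statement is the Claim_ definition above) =====
theorem solution_spec : Claim_equal_solution := by
  unfold Claim_equal_solution
  intro queries _ hpre
  unfold Spec_solution solution solution_alt
  -- A side: decompose the interleaved pass into per-slot replays over the range of slots
  rw [A_decomp queries 0 _ hpre (List.length_replicate ..), zero_add]
  have hmapA : (List.range 1000).map
        (fun j => gSlot ((List.replicate 1000 ((1:Int), (0:Int))).getD j ((1:Int), (0:Int)))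
          (proj (j : Int) queries)) =
      ((List.range 1000).map (fun j : Nat => (j : Int))).map
        (fun k : Int => gSlot (1, 0) (proj k queries)) := by
    rw [List.map_map]
    apply List.map_congr_left
    intro j hj
    show gSlot ((List.replicate 1000 ((1:Int), (0:Int))).getD j ((1:Int), (0:Int)))
        (proj (j : Int) queries) = gSlot (1, 0) (proj (j : Int) queries)
    rw [getD_replicate' 1000 j _ _ (List.mem_range.mp hj)]
  rw [hmapA]
  -- B side: the bucket fold is the sum of per-bucket replays over the keys
  have hknd := buckets_keys_inv queries PySem.Dict.empty
    (by rw [PySem.Dict.keys_empty]; exact List.nodup_nil)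
    (by rw [PySem.Dict.keys_empty]; intro k hk; simp at hk)
  rw [outer_eq, zero_add,
      PySem.Dict.values_eq_map_keys (bucketsOf queries) hknd.1 []]
  conv_rhs => rw [List.map_map]
  have hbucket : ∀ k ∈ (bucketsOf queries).keys,
      (hSlot 0 1 ∘ fun k => (bucketsOf queries).getD k []) k =
        (fun k : Int => gSlot (1, 0) (proj k queries)) k := by
    intro k _
    show hSlot 0 1 ((bucketsOf queries).getD k []) = gSlot (1, 0) (proj k queries)
    rw [show (bucketsOf queries).getD k [] = proj k queries from by
          rw [bucketsOf, buckets_getD queries PySem.Dict.empty k]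
          rfl]
    have := gSlot_eq_hSlot (proj k queries) 0 1 (by omega)
    rw [← this]
    rfl
  rw [List.map_congr_left hbucket]
  -- the two index sets carry the same nonzero terms
  apply sum_restrict
  · exact List.Nodup.map Nat.cast_injective List.nodup_range
  · exact hknd.1
  · intro k hk
    obtain ⟨h0, h1⟩ := hknd.2 k hk
    exact List.mem_map.mpr ⟨k.toNat, List.mem_range.mpr (by omega), by omega⟩
  · intro k hkL hkS
    have hnc : (bucketsOf queries).contains k = false := by
      cases hcb : (bucketsOf queries).contains k with
      | false => rfl
      | true => exact absurd ((PySem.Dict.contains_iff_mem_keys _ k).mp hcb) hkS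
    have hb := buckets_getD queries PySem.Dict.empty k
    rw [show (queries.foldl step1 PySem.Dict.empty) = bucketsOf queries from rfl,
        PySem.Dict.getD_of_not_contains _ _ hnc] at hb
    have hproj : proj k queries = [] := by
      rw [show ((PySem.Dict.empty : PySem.Dict Int (List Int)).getD k [] ++ proj k queries)
            = proj k queries from by rfl] at hb
      exact hb.symm
    rw [hproj]
    rfl
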